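-- pv_equiv track=rewrite | github.com/gn0/extract-from-stata | extract_from_stata/model/equalmeans.py | find_first_table_in
-- ===== SOURCE A (Python) =====
-- def is_beginning_of_table(line):
--     return (line.startswith("Paired t test")
--             or line.startswith("Two-sample t test"))
--
-- def find_first_table_in(string):
--     table_string = ""
--
--     for line in string.splitlines(True):
--         if is_beginning_of_table(line):
--             table_string += line
--         elif table_string:
--             table_string += line
--
--             if line.startswith(" Pr(T < t) = "):
--                 break
--
--     return table_string
-- ===== SOURCE B (Python) =====
-- def is_beginning_of_table(line):
--     return (line.startswith("Paired t test")
--             or line.startswith("Two-sample t test"))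
--
-- def find_first_table_in(string):
--     lines = string.splitlines(True)
--     start = next((i for i, line in enumerate(lines)
--                   if is_beginning_of_table(line)), None)
--     if start is None:
--         return ""
--     result = []
--     for line in lines[start:]:
--         result.append(line)
--         if line.startswith(" Pr(T < t) = "):
--             break
--     return "".join(result)
-- ===== Notes on version B (the rewrite author's own statement) =====
-- stated objective: alternative
-- what changed: Replaces A's single loop with implicit empty-string state by a two-phase scan: find the index of the first table-start line, then collect lines from there into a list until the end marker, joining at the end.
import Mathlib
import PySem

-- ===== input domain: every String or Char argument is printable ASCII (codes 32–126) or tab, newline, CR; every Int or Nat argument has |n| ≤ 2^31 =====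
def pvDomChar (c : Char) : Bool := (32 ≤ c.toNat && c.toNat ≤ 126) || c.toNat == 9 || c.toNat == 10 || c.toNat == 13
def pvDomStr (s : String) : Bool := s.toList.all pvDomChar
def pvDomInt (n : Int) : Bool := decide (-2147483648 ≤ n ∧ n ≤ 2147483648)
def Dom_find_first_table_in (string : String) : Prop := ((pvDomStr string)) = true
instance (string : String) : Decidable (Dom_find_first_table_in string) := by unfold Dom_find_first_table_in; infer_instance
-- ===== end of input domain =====

-- B replaces A's single loop with implicit empty-string state by a two-phase scan
-- (find the first table-start line's index, then collect until the end marker); alternative decomposition, same cost.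


-- shared helper: str.splitlines(True) (keepends), ported by hand; exact on the ASCII domain,
-- where the only line boundaries are '\n', '\r\n' and '\r'.
def splitKeepGo (acc : List Char) : List Char → List (List Char)
  | [] => if acc.isEmpty then [] else [acc.reverse]
  | c :: rest =>
    if c = '\n' then (acc.reverse ++ ['\n']) :: splitKeepGo [] rest
    else if c = '\r' then
      if rest.head? = some '\n' then (acc.reverse ++ ['\r', '\n']) :: splitKeepGo [] rest.tail
      else (acc.reverse ++ ['\r']) :: splitKeepGo [] rest
    else splitKeepGo (c :: acc) rest
termination_by cs => cs.length
decreasing_by all_goals simp [List.length_tail]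

def splitlinesKeep (s : List Char) : List (List Char) := splitKeepGo [] s

def is_beginning_of_table (line : List Char) : Bool :=
  PySem.Chars.startswith line "Paired t test".toList
    || PySem.Chars.startswith line "Two-sample t test".toList

def endMark (line : List Char) : Bool :=
  PySem.Chars.startswith line " Pr(T < t) = ".toList

-- ===== PORT A =====
def loopA : List (List Char) → List Char → List Char
  | [], table_string => table_string
  | line :: rest, table_string =>
    if is_beginning_of_table line then loopA rest (table_string ++ line)
    else if table_string.isEmpty then loopA rest table_string
    else
      let ts := table_string ++ line
      if endMark line then ts else loopA rest ts

def find_first_table_in (string : String) : String :=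
  String.ofList (loopA (splitlinesKeep string.toList) [])

-- ===== PORT B =====
def collectB : List (List Char) → List (List Char)
  | [] => []
  | line :: rest => line :: (if endMark line then [] else collectB rest)

def find_first_table_in_alt (string : String) : String :=
  let lines := splitlinesKeep string.toList
  match lines.findIdx? is_beginning_of_table with
  | none => ""
  | some i => String.ofList (PySem.Chars.join [] (collectB (lines.drop i)))

-- ===== PRECONDITION & SPEC =====
def Spec_find_first_table_in (string : String) (out : String) : Prop := out = find_first_table_in_alt string
instance (string : String) (out : String) : Decidable (Spec_find_first_table_in string out) := by unfold Spec_find_first_table_in; infer_instance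

-- ===== CLAIM (what is proved, stated in full; the proofs are below) =====
def Claim_equal_find_first_table_in : Prop := ∀ (string : String), Dom_find_first_table_in string → Spec_find_first_table_in string (find_first_table_in string)

-- ===== LEMMAS AND PROOFS =====
lemma join_nil_eq_flatten (ps : List (List Char)) : PySem.Chars.join [] ps = ps.flatten := by
  induction ps with
  | nil => simp [PySem.Chars.join, List.intercalate]
  | cons p ps ih => cases ps <;> simp_all [PySem.Chars.join, List.intercalate, List.intersperse]

lemma beg_ne_nil {l : List Char} (h : is_beginning_of_table l = true) : l ≠ [] := by
  rcases Bool.or_eq_true_iff.mp h with h' | h' <;>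
    · have := (PySem.Chars.startswith_iff _ _).mp h'
      rcases this with ⟨t, ht⟩
      intro hn; rw [hn] at ht; simp at ht

lemma beg_not_end {l : List Char} (h : is_beginning_of_table l = true) : endMark l = false := by
  by_contra hc
  have he : endMark l = true := by revert hc; cases endMark l <;> simp
  rcases (PySem.Chars.startswith_iff _ _).mp he with ⟨t, ht⟩
  rcases Bool.or_eq_true_iff.mp h with h' | h' <;>
    · rcases (PySem.Chars.startswith_iff _ _).mp h' with ⟨t', ht'⟩
      rw [← ht'] at ht
      simp at ht

lemma loopA_after (lines : List (List Char)) :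
    ∀ ts : List Char, ts ≠ [] → loopA lines ts = ts ++ (collectB lines).flatten := by
  induction lines with
  | nil => intro ts _; simp [loopA, collectB]
  | cons l rest ih =>
    intro ts hts
    by_cases hb : is_beginning_of_table l = true
    · have hl := beg_ne_nil hb
      have hne : endMark l = false := beg_not_end hb
      simp [loopA, hb, collectB, hne, ih (ts ++ l) (by simp [hts])]
    · have hb' : is_beginning_of_table l = false := by revert hb; cases is_beginning_of_table l <;> simp
      have hemp : ts.isEmpty = false := by simpa [List.isEmpty_iff] using hts
      by_cases he : endMark l = true
      · simp [loopA, hb', hemp, collectB, he]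
      · have he' : endMark l = false := by revert he; cases endMark l <;> simp
        simp [loopA, hb', hemp, collectB, he', ih (ts ++ l) (by simp [hts])]

lemma loopA_start (lines : List (List Char)) :
    loopA lines [] =
      (match lines.findIdx? is_beginning_of_table with
       | none => []
       | some i => (collectB (lines.drop i)).flatten) := by
  induction lines with
  | nil => simp [loopA]
  | cons l rest ih =>
    by_cases hb : is_beginning_of_table l = true
    · have hl := beg_ne_nil hb
      have hne : endMark l = false := beg_not_end hb
      simp [loopA, hb, List.findIdx?_cons, collectB, hne,
        loopA_after rest l (by simpa using hl)]
    · have hb' : is_beginning_of_table l = false := by revert hb; cases is_beginning_of_table l <;> simp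
      rw [List.findIdx?_cons]
      simp only [hb', Bool.false_eq_true, if_false]
      cases hfi : rest.findIdx? is_beginning_of_table with
      | none => simpa [loopA, hb', hfi] using ih
      | some i => simpa [loopA, hb', hfi, List.drop_succ_cons] using ih

-- ===== VERDICT (by name: the statement is the Claim_ definition above) =====
theorem find_first_table_in_spec : Claim_equal_find_first_table_in := by
  intro s _
  unfold Spec_find_first_table_in find_first_table_in find_first_table_in_alt
  rw [loopA_start]
  cases hfi : (splitlinesKeep s.toList).findIdx? is_beginning_of_table with
  | none => simp [hfi]
  | some i => simp [hfi, join_nil_eq_flatten]
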